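-- pv_equiv track=rewrite | github.com/Isoris/inversion-popgen-toolkit | inversion_modules/phase_4_postprocessing/4d_group_dependent/cheat29b_assembled_junction.py | select_best_record
-- ===== SOURCE A (Python) =====
-- def select_best_record(matching):
--     """
--     Preference order for the best junction-forensics source:
--     1. delly_inv (PRECISE) — has CONSENSUS + HOMLEN
--     2. manta_inv (PRECISE) — has HOMLEN, ALT is <INV> symbolic
--     3. delly_bnd pair (both 3to3 + 5to5 present for the same candidate)
--        — two BND records can each carry CONSENSUS
--     4. delly_bnd single-sided — still has CONSENSUS for one boundary
--     """
--     if not matching: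
--         return None, "none"
--
--     # 1. Any delly_inv?
--     delly_inv = [r for r in matching if r["source"] == "delly_inv"]
--     if delly_inv:
--         return delly_inv[0], "delly_inv"
--
--     # 2. Any manta_inv?
--     manta_inv = [r for r in matching if r["source"] == "manta_inv"]
--     if manta_inv:
--         return manta_inv[0], "manta_inv"
--
--     # 3/4. DELLY BNDs
--     bnds = [r for r in matching if r["source"] == "delly_bnd"]
--     left_bnds = [r for r in bnds if r["ct"] == "3to3"]
--     right_bnds = [r for r in bnds if r["ct"] == "5to5"]
--     if left_bnds and right_bnds:
--         return left_bnds[0], "delly_bnd_pair"  # prefer left as primary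
--     if left_bnds:
--         return left_bnds[0], "delly_bnd_single"
--     if right_bnds:
--         return right_bnds[0], "delly_bnd_single"
--     return None, "none"
-- ===== SOURCE B (Python) =====
-- def select_best_record(matching):
--     # One pass, four first-seen slots, then the priority cascade.
--     di = mi = lb = rb = None
--     for r in matching:
--         src = r["source"]
--         if src == "delly_inv":
--             if di is None:
--                 di = r
--         elif src == "manta_inv":
--             if mi is None:
--                 mi = r
--         elif src == "delly_bnd":
--             ct = r.get("ct")
--             if ct == "3to3":
--                 if lb is None:
--                     lb = r
--             elif ct == "5to5":
--                 if rb is None: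
--                     rb = r
--     if di is not None:
--         return di, "delly_inv"
--     if mi is not None:
--         return mi, "manta_inv"
--     if lb is not None and rb is not None:
--         return lb, "delly_bnd_pair"
--     if lb is not None:
--         return lb, "delly_bnd_single"
--     if rb is not None:
--         return rb, "delly_bnd_single"
--     return None, "none"
-- ===== Notes on version B (the rewrite author's own statement) =====
-- stated objective: alternative
-- what changed: Replaces A's five list-comprehension filtering passes with a single pass that maintains four first-seen slots (delly_inv, manta_inv, delly_bnd 3to3, delly_bnd 5to5) followed by the same priority cascade.
import Mathlib
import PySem

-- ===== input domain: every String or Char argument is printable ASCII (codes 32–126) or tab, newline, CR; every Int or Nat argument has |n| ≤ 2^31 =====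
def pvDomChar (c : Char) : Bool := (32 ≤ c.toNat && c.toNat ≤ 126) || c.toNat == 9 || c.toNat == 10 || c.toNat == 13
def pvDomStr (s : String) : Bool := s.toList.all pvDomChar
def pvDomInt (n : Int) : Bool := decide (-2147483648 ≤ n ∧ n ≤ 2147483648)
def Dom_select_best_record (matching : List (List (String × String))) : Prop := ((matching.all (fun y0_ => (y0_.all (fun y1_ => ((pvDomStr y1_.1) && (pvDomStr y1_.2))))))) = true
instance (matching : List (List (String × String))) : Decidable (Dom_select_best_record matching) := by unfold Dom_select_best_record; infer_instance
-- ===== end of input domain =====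

-- B replaces A's five filtering passes with a single pass keeping four first-seen slots plus the same priority cascade (alternative decomposition; return value only).


-- ===== PORT A =====
-- r[k] (KeyError excluded by Pre_): first-match lookup, "" only outside Pre_
def pvGet (r : List (String × String)) (k : String) : String :=
  ((PySem.Dict.mk r).get? k).getD ""

def select_best_record (matching : List (List (String × String))) : (Option (List (String × String))) × String :=
  if matching = [] then (none, "none")
  else
    let delly_inv := matching.filter (fun r => pvGet r "source" == "delly_inv")
    if !delly_inv.isEmpty then (delly_inv.head?, "delly_inv")
    else
      let manta_inv := matching.filter (fun r => pvGet r "source" == "manta_inv")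
      if !manta_inv.isEmpty then (manta_inv.head?, "manta_inv")
      else
        let bnds := matching.filter (fun r => pvGet r "source" == "delly_bnd")
        let left_bnds := bnds.filter (fun r => pvGet r "ct" == "3to3")
        let right_bnds := bnds.filter (fun r => pvGet r "ct" == "5to5")
        if !left_bnds.isEmpty && !right_bnds.isEmpty then (left_bnds.head?, "delly_bnd_pair")
        else if !left_bnds.isEmpty then (left_bnds.head?, "delly_bnd_single")
        else if !right_bnds.isEmpty then (right_bnds.head?, "delly_bnd_single")
        else (none, "none")

-- ===== PORT B =====
def pvSlots := Option (List (String × String)) × Option (List (String × String)) × Option (List (String × String)) × Option (List (String × String))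

def pvStep (s : pvSlots) (r : List (String × String)) : pvSlots :=
  match s with
  | (di, mi, lb, rb) =>
    let src := pvGet r "source"
    if src == "delly_inv" then ((if di.isNone then some r else di), mi, lb, rb)
    else if src == "manta_inv" then (di, (if mi.isNone then some r else mi), lb, rb)
    else if src == "delly_bnd" then
      let ct := (PySem.Dict.mk r).get? "ct"   -- r.get("ct")
      if ct == some "3to3" then (di, mi, (if lb.isNone then some r else lb), rb)
      else if ct == some "5to5" then (di, mi, lb, (if rb.isNone then some r else rb))
      else (di, mi, lb, rb)
    else (di, mi, lb, rb)

def select_best_record_alt (matching : List (List (String × String))) : (Option (List (String × String))) × String :=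
  match matching.foldl pvStep (none, none, none, none) with
  | (di, mi, lb, rb) =>
    if di.isSome then (di, "delly_inv")
    else if mi.isSome then (mi, "manta_inv")
    else if lb.isSome && rb.isSome then (lb, "delly_bnd_pair")
    else if lb.isSome then (lb, "delly_bnd_single")
    else if rb.isSome then (rb, "delly_bnd_single")
    else (none, "none")

-- ===== PRECONDITION & SPEC =====
-- Pre_ excludes exactly the inputs where A raises KeyError: a record without "source",
-- or (when no delly_inv/manta_inv record exists) a delly_bnd record without "ct".
def Pre_select_best_record (matching : List (List (String × String))) : Prop :=
  (∀ r ∈ matching, ((PySem.Dict.mk r).get? "source").isSome = true) ∧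
  ((∀ r ∈ matching, pvGet r "source" ≠ "delly_inv" ∧ pvGet r "source" ≠ "manta_inv") →
    ∀ r ∈ matching, pvGet r "source" = "delly_bnd" → ((PySem.Dict.mk r).get? "ct").isSome = true)
instance (matching : List (List (String × String))) : Decidable (Pre_select_best_record matching) := by unfold Pre_select_best_record; infer_instance

def pvWitness_select_best_record : (List (List (String × String))) := [[("source", "delly_inv")]]

def Spec_select_best_record (matching : List (List (String × String))) (out : (Option (List (String × String))) × String) : Prop := out = select_best_record_alt matching
instance (matching : List (List (String × String))) (out : (Option (List (String × String))) × String) : Decidable (Spec_select_best_record matching out) := by unfold Spec_select_best_record; infer_instance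

-- ===== CLAIM (what is proved, stated in full; the proofs are below) =====
def Claim_equal_select_best_record : Prop := ∀ (matching : List (List (String × String))), Dom_select_best_record matching → Pre_select_best_record matching → Spec_select_best_record matching (select_best_record matching)

-- ===== LEMMAS AND PROOFS =====
def pInv (r : List (String × String)) : Bool := pvGet r "source" == "delly_inv"
def pManta (r : List (String × String)) : Bool := pvGet r "source" == "manta_inv"
def pLB (r : List (String × String)) : Bool := pvGet r "source" == "delly_bnd" && ((PySem.Dict.mk r).get? "ct" == some "3to3")
def pRB (r : List (String × String)) : Bool := pvGet r "source" == "delly_bnd" && ((PySem.Dict.mk r).get? "ct" == some "5to5")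

def fOr {α : Type} (d x : Option α) : Option α := if d.isNone then x else d

theorem foldl_pvStep (ds : List (List (String × String))) (d m l rr : Option (List (String × String))) :
    ds.foldl pvStep (d, m, l, rr) =
      (fOr d ((ds.filter pInv).head?), fOr m ((ds.filter pManta).head?),
       fOr l ((ds.filter pLB).head?), fOr rr ((ds.filter pRB).head?)) := by
  induction ds generalizing d m l rr with
  | nil => simp [fOr]; cases d <;> cases m <;> cases l <;> cases rr <;> simp
  | cons r ds ih =>
    simp only [List.foldl_cons]
    by_cases h1 : pvGet r "source" = "delly_inv"
    · simp [pvStep, h1, ih, pInv, pManta, pLB, pRB, fOr]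
      cases d <;> simp
    · by_cases h2 : pvGet r "source" = "manta_inv"
      · simp [pvStep, h2, ih, pInv, pManta, pLB, pRB, fOr]
        cases m <;> simp
      · by_cases h3 : pvGet r "source" = "delly_bnd"
        · by_cases h4 : (PySem.Dict.mk r).get? "ct" = some "3to3"
          · simp [pvStep, h3, h4, ih, pInv, pManta, pLB, pRB, fOr]
            cases l <;> simp
          · by_cases h5 : (PySem.Dict.mk r).get? "ct" = some "5to5"
            · simp [pvStep, h3, h5, ih, pInv, pManta, pLB, pRB, fOr]
              cases rr <;> simp
            · simp [pvStep, h3, h4, h5, ih, pInv, pManta, pLB, pRB]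
        · simp [pvStep, h1, h2, h3, ih, pInv, pManta, pLB, pRB]

theorem ct_bridge (r : List (String × String)) (s : String) (hs : s ≠ "") :
    (pvGet r "ct" == s) = ((PySem.Dict.mk r).get? "ct" == some s) := by
  unfold pvGet
  cases h : (PySem.Dict.mk r).get? "ct" <;> simp [Ne.symm hs]

theorem notEmpty_eq_isSome_head? {α : Type} (l : List α) : (!l.isEmpty) = l.head?.isSome := by
  cases l <;> simp

-- ===== VERDICT (by name: the statement is the Claim_ definition above) =====
theorem select_best_record_spec : Claim_equal_select_best_record := by
  intro matching _ _
  unfold Spec_select_best_record select_best_record select_best_record_alt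
  rw [foldl_pvStep]
  have hl : matching.filter pLB = (matching.filter (fun r => pvGet r "source" == "delly_bnd")).filter (fun r => pvGet r "ct" == "3to3") := by
    rw [List.filter_filter]
    apply List.filter_congr
    intro r _
    rw [ct_bridge r "3to3" (by decide)]
    simp [pLB, Bool.and_comm]
  have hr : matching.filter pRB = (matching.filter (fun r => pvGet r "source" == "delly_bnd")).filter (fun r => pvGet r "ct" == "5to5") := by
    rw [List.filter_filter]
    apply List.filter_congr
    intro r _
    rw [ct_bridge r "5to5" (by decide)]
    simp [pRB, Bool.and_comm]
  by_cases hnil : matching = []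
  · subst hnil
    simp [fOr]
  · rw [if_neg hnil]
    simp only [fOr, Option.isNone_none, if_pos, hl, hr, notEmpty_eq_isSome_head?]
    rfl
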